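-- pv_equiv track=rewrite | github.com/ryuheechul/advent-of-code | 2024/python/04/part2.py | search_all
-- ===== SOURCE A (Python) =====
-- Coords = tuple[int, int]
--
-- Grid = list[list[str]]
--
-- Steps = list[Coords]
--
-- mas = list("MAS")
--
-- rmas = list(reversed(mas))
--
-- def add(c1: Coords, c2: Coords):
--     x1, y1 = c1
--     x2, y2 = c2
--     return (x1 + x2, y1 + y2)
--
-- def check(
--     grid: Grid,
--     coords: Coords,
--     letter: str,
-- ):
--     x, y = coords
--     return grid[y][x] == letter
--
-- def _search(grid: Grid, start: Coords, steps: Steps, word: list[str]):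
--     to_search = zip(word, steps)
--
--     return sum(
--         check(grid, add(start, coords), letter) for letter, coords in to_search
--     ) == len(mas)
--
-- def search(grid: Grid, start: Coords, steps: Steps):
--     return _search(grid, start, steps, mas) or _search(grid, start, steps, rmas)
--
-- def search_all(grid: Grid, coords: Coords):
--     x, y = coords
--     len_y = len(grid)
--     len_x = len(grid[0])
--
--     all = []
--
--     #  0 1 2 3
--     #    x
--     #  x-1
--     #
--     safe_left = x > 0
--     safe_top = y > 0
--
--     #  0 1 2 [3]
--     #    x
--     #        len_x
--     safe_right = x + 1 < len_x
--     safe_bottom = y + 1 < len_y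
--
--     safe = safe_left and safe_right and safe_top and safe_bottom
--
--     if not safe:
--         return 0
--
--     #      0    1   2
--     # 0  -1,-1     1,-1
--     # 1        x,y
--     # 2  -1,1      1,1
--     all.append([(1, 1), (0, 0), (-1, -1)])
--     all.append([(-1, 1), (0, 0), (1, -1)])
--
--     return 1 if sum(search(grid, coords, s) for s in all) == 2 else 0
-- ===== SOURCE B (Python) =====
-- def _mas_pair(a, b):
--     return (a == "M" and b == "S") or (a == "S" and b == "M")
--
--
-- def search_all(grid, coords):
--     x, y = coords
--     if not (0 < x < len(grid[0]) - 1 and 0 < y < len(grid) - 1):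
--         return 0
--     if grid[y][x] != "A":
--         return 0
--     ok = _mas_pair(grid[y - 1][x - 1], grid[y + 1][x + 1]) and _mas_pair(
--         grid[y - 1][x + 1], grid[y + 1][x - 1]
--     )
--     return 1 if ok else 0
-- ===== Notes on version B (the rewrite author's own statement) =====
-- stated objective: simpler
-- what changed: Replaces A's add/check/_search/search helper chain (zipping MAS/SAM against step lists and counting matches with sum) by direct indexing of the centre and four corner cells with one M/S pair test per diagonal, no loops or zips.
-- outside the precondition, e.g. on search_all([], (1, 1)): A raises IndexError, B raises IndexError; on search_all([['M', 'X', 'S'], ['A'], ['M', 'X', 'S']], (1, 1)): A raises IndexError, B raises IndexError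
import Mathlib
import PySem

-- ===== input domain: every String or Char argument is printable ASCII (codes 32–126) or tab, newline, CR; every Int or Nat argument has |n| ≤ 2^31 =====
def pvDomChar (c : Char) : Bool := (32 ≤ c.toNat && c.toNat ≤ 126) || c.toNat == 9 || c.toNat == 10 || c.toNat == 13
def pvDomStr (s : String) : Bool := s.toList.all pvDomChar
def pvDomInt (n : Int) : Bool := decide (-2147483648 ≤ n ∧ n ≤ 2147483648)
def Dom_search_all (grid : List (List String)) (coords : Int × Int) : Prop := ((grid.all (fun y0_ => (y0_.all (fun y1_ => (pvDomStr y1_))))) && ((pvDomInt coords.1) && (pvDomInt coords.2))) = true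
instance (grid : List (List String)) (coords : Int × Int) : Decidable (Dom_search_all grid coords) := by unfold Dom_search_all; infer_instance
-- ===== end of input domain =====

-- B replaces A's helper chain (add/check/_search/search, zip of word and steps, counting sums)
-- by direct indexing of the centre and the four corners with one pair test per diagonal (objective: simpler).

-- ===== PORT A =====
def pvMas : List String := ["M", "A", "S"]

def pvRmas : List String := pvMas.reverse

def pvAdd (c1 c2 : Int × Int) : Int × Int := (c1.1 + c2.1, c1.2 + c2.2)

-- grid[y][x] == letter; Python raises on a missing cell, the port returns "" there (excluded by Pre_)
def pvCheck (grid : List (List String)) (coords : Int × Int) (letter : String) : Bool :=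
  (PySem.List.pyGet? ((PySem.List.pyGet? grid coords.2).getD []) coords.1).getD "" == letter

def pvSearchW (grid : List (List String)) (start : Int × Int) (steps : List (Int × Int))
    (word : List String) : Bool :=
  ((word.zip steps).foldl
      (fun acc p => acc + (if pvCheck grid (pvAdd start p.2) p.1 then (1 : Int) else 0)) 0)
    == (pvMas.length : Int)

def pvSearch (grid : List (List String)) (start : Int × Int) (steps : List (Int × Int)) : Bool :=
  pvSearchW grid start steps pvMas || pvSearchW grid start steps pvRmas

def search_all (grid : List (List String)) (coords : Int × Int) : Int :=
  let x := coords.1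
  let y := coords.2
  let len_y : Int := grid.length
  let len_x : Int := ((PySem.List.pyGet? grid 0).getD []).length  -- grid[0]: IndexError on [] (excluded by Pre_)
  let safe_left := decide (x > 0)
  let safe_top := decide (y > 0)
  let safe_right := decide (x + 1 < len_x)
  let safe_bottom := decide (y + 1 < len_y)
  let safe := safe_left && safe_right && safe_top && safe_bottom
  if !safe then 0
  else
    let all : List (List (Int × Int)) := [[(1, 1), (0, 0), (-1, -1)], [(-1, 1), (0, 0), (1, -1)]]
    if (all.foldl (fun acc s => acc + (if pvSearch grid coords s then (1 : Int) else 0)) 0) == 2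
    then 1 else 0

-- ===== PORT B =====
def pvMasPair (a b : String) : Bool :=
  (a == "M" && b == "S") || (a == "S" && b == "M")

-- grid[cy][cx]; Python raises on a missing cell, the port returns "" there (excluded by Pre_)
def pvCellB (grid : List (List String)) (cx cy : Int) : String :=
  (PySem.List.pyGet? ((PySem.List.pyGet? grid cy).getD []) cx).getD ""

def search_all_alt (grid : List (List String)) (coords : Int × Int) : Int :=
  let x := coords.1
  let y := coords.2
  if !(decide (0 < x) && decide (x < (((PySem.List.pyGet? grid 0).getD []).length : Int) - 1)
       && decide (0 < y) && decide (y < (grid.length : Int) - 1)) then 0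
  else if pvCellB grid x y != "A" then 0
  else if pvMasPair (pvCellB grid (x - 1) (y - 1)) (pvCellB grid (x + 1) (y + 1))
          && pvMasPair (pvCellB grid (x - 1) (y + 1)) (pvCellB grid (x + 1) (y - 1))
       then 1 else 0

-- ===== PRECONDITION & SPEC =====
-- Pre_ excludes exactly the inputs where A raises IndexError: the empty grid (grid[0]),
-- and in-bounds coords (w.r.t. row 0's length) whose three touched rows are too short for the cells read.
def Pre_search_all (grid : List (List String)) (coords : Int × Int) : Prop :=
  grid ≠ [] ∧
  ((0 < coords.1 ∧ coords.1 + 1 < ((grid.headD []).length : Int) ∧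
    0 < coords.2 ∧ coords.2 + 1 < (grid.length : Int)) →
    (coords.1 + 1 < ((grid.getD (coords.2 - 1).toNat []).length : Int) ∧
     coords.1 < ((grid.getD coords.2.toNat []).length : Int) ∧
     coords.1 + 1 < ((grid.getD (coords.2 + 1).toNat []).length : Int)))

instance (grid : List (List String)) (coords : Int × Int) : Decidable (Pre_search_all grid coords) := by
  unfold Pre_search_all; infer_instance

def pvWitness_search_all : List (List String) × (Int × Int) :=
  ([["M", "X", "S"], ["X", "A", "X"], ["M", "X", "S"]], (1, 1))

def Spec_search_all (grid : List (List String)) (coords : Int × Int) (out : Int) : Prop := out = search_all_alt grid coords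
instance (grid : List (List String)) (coords : Int × Int) (out : Int) : Decidable (Spec_search_all grid coords out) := by unfold Spec_search_all; infer_instance

-- ===== CLAIM (what is proved, stated in full; the proofs are below) =====
def Claim_equal_search_all : Prop := ∀ (grid : List (List String)) (coords : Int × Int), Dom_search_all grid coords → Pre_search_all grid coords → Spec_search_all grid coords (search_all grid coords)

-- ===== LEMMAS AND PROOFS =====

-- ===== VERDICT (by name: the statement is the Claim_ definition above) =====
lemma rowA (grid : List (List String)) (j : Int) (h0 : 0 ≤ j) (h1 : j < (grid.length : Int)) :
    (PySem.List.pyGet? grid j).getD [] = grid.getD j.toNat [] := by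
  rw [PySem.List.pyGet?_eq_some_getElem _ h0 (by exact_mod_cast h1)]
  simp [List.getD_eq_getElem?_getD, List.getElem?_eq_getElem (by omega : j.toNat < grid.length)]

lemma cellA (row : List String) (i : Int) (h0 : 0 ≤ i) (h1 : i < (row.length : Int)) :
    (PySem.List.pyGet? row i).getD "" = row.getD i.toNat "" := by
  rw [PySem.List.pyGet?_eq_some_getElem _ h0 (by exact_mod_cast h1)]
  simp [List.getD_eq_getElem?_getD, List.getElem?_eq_getElem (by omega : i.toNat < row.length)]

theorem search_all_spec : Claim_equal_search_all := by
  intro grid coords hdom hpre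
  obtain ⟨x, y⟩ := coords
  obtain ⟨hne, hrows⟩ := hpre
  unfold Spec_search_all search_all search_all_alt
  simp only []
  have h0 : (PySem.List.pyGet? grid 0).getD [] = grid.headD [] := by
    cases grid with
    | nil => simp at hne
    | cons r rs => simp
  by_cases hs : 0 < x ∧ x + 1 < ((grid.headD []).length : Int) ∧ 0 < y ∧ y + 1 < (grid.length : Int)
  · obtain ⟨hx0, hxL, hy0, hyN⟩ := hs
    obtain ⟨hr1, hr2, hr3⟩ := hrows ⟨hx0, hxL, hy0, hyN⟩
    dsimp only at hr1 hr2 hr3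
    rw [h0]
    simp only [pvSearch, pvSearchW, pvCheck, pvAdd, pvCellB, pvMas, pvRmas, pvMasPair,
      List.reverse, List.reverseAux, List.zip, List.zipWith, List.foldl, List.length,
      add_zero, ← sub_eq_add_neg]
    simp only [rowA grid (y + 1) (by omega) (by omega), rowA grid (y - 1) (by omega) (by omega),
      rowA grid y (by omega) (by omega)]
    simp only [cellA (grid.getD (y + 1).toNat []) (x + 1) (by omega) (by omega),
      cellA (grid.getD (y + 1).toNat []) (x - 1) (by omega) (by omega),
      cellA (grid.getD (y - 1).toNat []) (x + 1) (by omega) (by omega),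
      cellA (grid.getD (y - 1).toNat []) (x - 1) (by omega) (by omega),
      cellA (grid.getD y.toNat []) x (by omega) (by omega)]
    simp only [hx0, hxL, hy0, hyN,
      show x < ((grid.headD []).length : Int) - 1 by omega,
      show y < (grid.length : Int) - 1 by omega,
      decide_true, Bool.and_self, Bool.not_true, Bool.false_eq_true, if_false]
    generalize (grid.getD (y + 1).toNat []).getD (x + 1).toNat "" = P1
    generalize (grid.getD (y - 1).toNat []).getD (x - 1).toNat "" = P2
    generalize (grid.getD (y + 1).toNat []).getD (x - 1).toNat "" = Q1
    generalize (grid.getD (y - 1).toNat []).getD (x + 1).toNat "" = Q2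
    generalize (grid.getD y.toNat []).getD x.toNat "" = C
    clear hdom hne hrows h0 hx0 hxL hy0 hyN hr1 hr2 hr3
    clear grid x y
    by_cases hC : C = "A" <;>
      by_cases h1 : P1 = "M" <;> by_cases h2 : P1 = "S" <;>
      by_cases h3 : P2 = "M" <;> by_cases h4 : P2 = "S" <;>
      by_cases h5 : Q1 = "M" <;> by_cases h6 : Q1 = "S" <;>
      by_cases h7 : Q2 = "M" <;> by_cases h8 : Q2 = "S" <;>
      simp [hC, h1, h2, h3, h4, h5, h6, h7, h8, beq_iff_eq]
  · rw [h0]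
    have h1 : (!(decide (x > 0) && decide (x + 1 < ((grid.headD []).length : Int)) && decide (y > 0)
        && decide (y + 1 < (grid.length : Int)))) = true := by
      simp only [Bool.not_eq_true', Bool.and_eq_false_iff, decide_eq_false_iff_not]; omega
    have h2 : (!(decide (0 < x) && decide (x < ((grid.headD []).length : Int) - 1) && decide (0 < y)
        && decide (y < (grid.length : Int) - 1))) = true := by
      simp only [Bool.not_eq_true', Bool.and_eq_false_iff, decide_eq_false_iff_not]; omega
    simp only [h1, h2, if_true]
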